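-- pv_equiv track=rewrite | github.com/Sahilarora2165/ComplianceGPT | backend/agents/deadline_agent.py | _infer_regulator_from_obligation
-- ===== SOURCE A (Python) =====
-- def _infer_regulator_from_obligation(obligation_type: str, tags: list[str]) -> str:
--     """Infer regulator from obligation type and client tags."""
--     obligation_lower = obligation_type.lower()
--
--     if "gst" in obligation_lower or "gstr" in obligation_lower:
--         return "GST"
--     elif "tds" in obligation_lower or "income" in obligation_lower or "itr" in obligation_lower or "advance tax" in obligation_lower:
--         return "IncomeTax"
--     elif "rbi" in obligation_lower or "softex" in obligation_lower or "export" in obligation_lower: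
--         return "RBI"
--     elif "fema" in obligation_lower:
--         return "RBI"
--     elif "sebi" in obligation_lower:
--         return "SEBI"
--     elif "mca" in obligation_lower or "llp" in obligation_lower or "cin" in obligation_lower:
--         return "MCA"
--     elif "transfer pricing" in obligation_lower or "tp" in obligation_lower:
--         return "IncomeTax"
--
--     # Fallback to first tag
--     if tags:
--         tag_map = {
--             "GST": "GST",
--             "IncomeTax": "IncomeTax",
--             "RBI": "RBI",
--             "FEMA": "RBI",
--             "SEBI": "SEBI",
--             "MCA": "MCA"
--         }
--         for tag in tags:
--             if tag in tag_map:
--                 return tag_map[tag]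
--
--     return "Unknown"
-- ===== SOURCE B (Python) =====
-- # Exhaustive-match rewrite: collect ALL matching keywords from one flat table, then
-- # pick the highest-priority hit with min(); tag fallback is a staged comprehension.
-- _KEYWORDS = [
--     ("gst", 0, "GST"), ("gstr", 0, "GST"),
--     ("tds", 1, "IncomeTax"), ("income", 1, "IncomeTax"),
--     ("itr", 1, "IncomeTax"), ("advance tax", 1, "IncomeTax"),
--     ("rbi", 2, "RBI"), ("softex", 2, "RBI"), ("export", 2, "RBI"),
--     ("fema", 3, "RBI"),
--     ("sebi", 4, "SEBI"),
--     ("mca", 5, "MCA"), ("llp", 5, "MCA"), ("cin", 5, "MCA"),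
--     ("transfer pricing", 6, "IncomeTax"), ("tp", 6, "IncomeTax"),
-- ]
--
-- _TAG_MAP = {
--     "GST": "GST",
--     "IncomeTax": "IncomeTax",
--     "RBI": "RBI",
--     "FEMA": "RBI",
--     "SEBI": "SEBI",
--     "MCA": "MCA",
-- }
--
--
-- def _infer_regulator_from_obligation(obligation_type: str, tags: list[str]) -> str:
--     ol = obligation_type.lower()
--     hits = [(p, r) for kw, p, r in _KEYWORDS if kw in ol]
--     if hits:
--         return min(hits, key=lambda h: h[0])[1]
--     tag_hits = [_TAG_MAP[t] for t in tags if t in _TAG_MAP]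
--     return tag_hits[0] if tag_hits else "Unknown"
-- ===== Notes on version B (the rewrite author's own statement) =====
-- stated objective: alternative
-- what changed: Instead of A's short-circuit if/elif chain, B collects ALL matching keywords from a flat (keyword, priority, regulator) table into a hits list and returns the regulator of the minimum-priority hit via min(); the tag fallback is likewise a staged comprehension whose first element is taken, rather than an early-return loop.
import Mathlib
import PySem

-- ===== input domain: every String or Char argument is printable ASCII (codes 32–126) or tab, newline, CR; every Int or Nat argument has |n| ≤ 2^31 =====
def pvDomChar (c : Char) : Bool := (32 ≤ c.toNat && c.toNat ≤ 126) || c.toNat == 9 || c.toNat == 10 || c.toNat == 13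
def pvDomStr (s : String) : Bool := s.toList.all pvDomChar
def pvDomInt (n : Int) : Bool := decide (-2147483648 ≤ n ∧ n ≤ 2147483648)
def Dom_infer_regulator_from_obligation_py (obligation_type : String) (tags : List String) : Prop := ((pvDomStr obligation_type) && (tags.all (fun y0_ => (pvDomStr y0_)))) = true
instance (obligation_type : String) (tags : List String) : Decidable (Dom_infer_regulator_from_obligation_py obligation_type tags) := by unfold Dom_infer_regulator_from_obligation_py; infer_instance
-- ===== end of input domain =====

-- B replaces A's ordered short-circuit if/elif chain by collecting ALL matching keywords
-- from one flat table and taking the minimum-priority hit (argmin), with a staged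
-- comprehension for the tag fallback (objective: alternative; same cost).

-- ===== PORT A =====
-- the dict literal built inside `if tags:` in A
def pvTagMapA : PySem.Dict String String :=
  ((((((PySem.Dict.empty.insert "GST" "GST").insert "IncomeTax" "IncomeTax").insert
      "RBI" "RBI").insert "FEMA" "RBI").insert "SEBI" "SEBI").insert "MCA" "MCA")

-- `for tag in tags: if tag in tag_map: return tag_map[tag]`
def pvTagForA : List String → Option String
  | [] => none
  | t :: ts =>
    match PySem.Dict.get? pvTagMapA t with
    | some v => some v
    | none => pvTagForA ts

def infer_regulator_from_obligation_py (obligation_type : String) (tags : List String) : String :=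
  let ol := PySem.Str.lower obligation_type
  if PySem.Str.isIn "gst" ol || PySem.Str.isIn "gstr" ol then "GST"
  else if PySem.Str.isIn "tds" ol || PySem.Str.isIn "income" ol || PySem.Str.isIn "itr" ol || PySem.Str.isIn "advance tax" ol then "IncomeTax"
  else if PySem.Str.isIn "rbi" ol || PySem.Str.isIn "softex" ol || PySem.Str.isIn "export" ol then "RBI"
  else if PySem.Str.isIn "fema" ol then "RBI"
  else if PySem.Str.isIn "sebi" ol then "SEBI"
  else if PySem.Str.isIn "mca" ol || PySem.Str.isIn "llp" ol || PySem.Str.isIn "cin" ol then "MCA"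
  else if PySem.Str.isIn "transfer pricing" ol || PySem.Str.isIn "tp" ol then "IncomeTax"
  else if tags ≠ [] then
    match pvTagForA tags with
    | some v => v
    | none => "Unknown"
  else "Unknown"

-- ===== PORT B =====
-- flat keyword table: (keyword, priority, regulator)
def pvKeywords : List (String × Nat × String) :=
  [ ("gst", 0, "GST"), ("gstr", 0, "GST"),
    ("tds", 1, "IncomeTax"), ("income", 1, "IncomeTax"),
    ("itr", 1, "IncomeTax"), ("advance tax", 1, "IncomeTax"),
    ("rbi", 2, "RBI"), ("softex", 2, "RBI"), ("export", 2, "RBI"),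
    ("fema", 3, "RBI"),
    ("sebi", 4, "SEBI"),
    ("mca", 5, "MCA"), ("llp", 5, "MCA"), ("cin", 5, "MCA"),
    ("transfer pricing", 6, "IncomeTax"), ("tp", 6, "IncomeTax") ]

def pvTagMapB : PySem.Dict String String :=
  ((((((PySem.Dict.empty.insert "GST" "GST").insert "IncomeTax" "IncomeTax").insert
      "RBI" "RBI").insert "FEMA" "RBI").insert "SEBI" "SEBI").insert "MCA" "MCA")

def infer_regulator_from_obligation_py_alt (obligation_type : String) (tags : List String) : String :=
  let ol := PySem.Str.lower obligation_type
  -- hits = [(p, r) for kw, p, r in _KEYWORDS if kw in ol]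
  let hits := (pvKeywords.filter (fun kw => PySem.Str.isIn kw.1 ol)).map (fun kw => (kw.2.1, kw.2.2))
  -- if hits: return min(hits, key=lambda h: h[0])[1]
  match PySem.List.min? hits (fun h => h.1) with
  | some m => m.2
  | none =>
    -- tag_hits = [_TAG_MAP[t] for t in tags if t in _TAG_MAP]
    let tagHits := tags.filterMap (fun t => PySem.Dict.get? pvTagMapB t)
    match tagHits with
    | v :: _ => v
    | [] => "Unknown"

-- ===== PRECONDITION & SPEC =====
def Spec_infer_regulator_from_obligation_py (obligation_type : String) (tags : List String) (out : String) : Prop := out = infer_regulator_from_obligation_py_alt obligation_type tags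
instance (obligation_type : String) (tags : List String) (out : String) : Decidable (Spec_infer_regulator_from_obligation_py obligation_type tags out) := by unfold Spec_infer_regulator_from_obligation_py; infer_instance

-- ===== CLAIM =====
def Claim_equal_infer_regulator_from_obligation_py : Prop := ∀ (obligation_type : String) (tags : List String), Dom_infer_regulator_from_obligation_py obligation_type tags → Spec_infer_regulator_from_obligation_py obligation_type tags (infer_regulator_from_obligation_py obligation_type tags)

-- ===== LEMMAS AND PROOFS =====

-- min?'s foldl keeps an accumulator that is already minimal
theorem pvMinStay {α : Type} (key : α → Nat) (xs : List α) (m : α)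
    (h : ∀ x ∈ xs, ¬ key x < key m) :
    xs.foldl (fun acc x => match acc with
      | none => some x
      | some m => if key x < key m then some x else some m) (some m) = some m := by
  induction xs with
  | nil => rfl
  | cons x t ih =>
    simp only [List.foldl_cons]
    rw [if_neg (h x (by simp))]
    exact ih (fun y hy => h y (by simp [hy]))

-- on a list whose keys are nondecreasing, Python's min (first extremal) is the head
theorem pvMinHead {α : Type} (key : α → Nat) (xs : List α)
    (h : xs.Pairwise (fun a b => key a ≤ key b)) :
    PySem.List.min? xs key = xs.head? := by
  cases xs with
  | nil => rfl
  | cons x t =>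
    unfold PySem.List.min?
    simp only [List.foldl_cons, List.head?_cons]
    exact pvMinStay key t x (fun y hy => by
      have := (List.pairwise_cons.mp h).1 y hy; omega)

theorem pvHeadFilter {α : Type} (p : α → Bool) (l : List α) :
    (l.filter p).head? = l.find? p := by
  induction l with
  | nil => rfl
  | cons x t ih =>
    by_cases hx : p x = true <;> simp [hx, ih]

-- A's fallback loop returns the first mapped tag
theorem pvTagForA_eq (ts : List String) :
    pvTagForA ts = (ts.filterMap (fun t => PySem.Dict.get? pvTagMapB t)).head? := by
  induction ts with
  | nil => rfl
  | cons t ts ih =>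
    unfold pvTagForA
    rw [show pvTagMapA = pvTagMapB from rfl]
    cases h : PySem.Dict.get? pvTagMapB t <;> simp [h, ih]

-- the if/elif chain, as a function of the 16 keyword-membership booleans
def pvChainOpt (b1 b2 b3 b4 b5 b6 b7 b8 b9 b10 b11 b12 b13 b14 b15 b16 : Bool) :
    Option (Nat × String) :=
  if b1 || b2 then some (0, "GST")
  else if b3 || b4 || b5 || b6 then some (1, "IncomeTax")
  else if b7 || b8 || b9 then some (2, "RBI")
  else if b10 then some (3, "RBI")
  else if b11 then some (4, "SEBI")
  else if b12 || b13 || b14 then some (5, "MCA")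
  else if b15 || b16 then some (6, "IncomeTax")
  else none

-- the chain equals the head of B's filtered hit list (16-boolean case check)
set_option maxHeartbeats 4000000 in
theorem pvChainFind (ol : String) :
    pvChainOpt (PySem.Str.isIn "gst" ol) (PySem.Str.isIn "gstr" ol)
      (PySem.Str.isIn "tds" ol) (PySem.Str.isIn "income" ol)
      (PySem.Str.isIn "itr" ol) (PySem.Str.isIn "advance tax" ol)
      (PySem.Str.isIn "rbi" ol) (PySem.Str.isIn "softex" ol)
      (PySem.Str.isIn "export" ol) (PySem.Str.isIn "fema" ol)
      (PySem.Str.isIn "sebi" ol) (PySem.Str.isIn "mca" ol)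
      (PySem.Str.isIn "llp" ol) (PySem.Str.isIn "cin" ol)
      (PySem.Str.isIn "transfer pricing" ol) (PySem.Str.isIn "tp" ol) =
    ((pvKeywords.filter (fun kw => PySem.Str.isIn kw.1 ol)).map
      (fun kw => (kw.2.1, kw.2.2))).head? := by
  rw [List.head?_map, pvHeadFilter]
  simp only [pvKeywords, List.find?_cons, List.find?_nil]
  generalize PySem.Str.isIn "gst" ol = b1
  generalize PySem.Str.isIn "gstr" ol = b2
  generalize PySem.Str.isIn "tds" ol = b3
  generalize PySem.Str.isIn "income" ol = b4
  generalize PySem.Str.isIn "itr" ol = b5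
  generalize PySem.Str.isIn "advance tax" ol = b6
  generalize PySem.Str.isIn "rbi" ol = b7
  generalize PySem.Str.isIn "softex" ol = b8
  generalize PySem.Str.isIn "export" ol = b9
  generalize PySem.Str.isIn "fema" ol = b10
  generalize PySem.Str.isIn "sebi" ol = b11
  generalize PySem.Str.isIn "mca" ol = b12
  generalize PySem.Str.isIn "llp" ol = b13
  generalize PySem.Str.isIn "cin" ol = b14
  generalize PySem.Str.isIn "transfer pricing" ol = b15
  generalize PySem.Str.isIn "tp" ol = b16
  revert b1 b2 b3 b4 b5 b6 b7 b8 b9 b10 b11 b12 b13 b14 b15 b16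
  decide

-- splitting the chain: string-valued ifs with fallback x vs. match on pvChainOpt
theorem pvChainSplit (b1 b2 b3 b4 b5 b6 b7 b8 b9 b10 b11 b12 b13 b14 b15 b16 : Bool)
    (x : String) :
    (if b1 || b2 then "GST"
     else if b3 || b4 || b5 || b6 then "IncomeTax"
     else if b7 || b8 || b9 then "RBI"
     else if b10 then "RBI"
     else if b11 then "SEBI"
     else if b12 || b13 || b14 then "MCA"
     else if b15 || b16 then "IncomeTax"
     else x) =
    (match pvChainOpt b1 b2 b3 b4 b5 b6 b7 b8 b9 b10 b11 b12 b13 b14 b15 b16 with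
     | some m => m.2
     | none => x) := by
  unfold pvChainOpt
  split_ifs <;> rfl

-- ===== VERDICT =====
theorem infer_regulator_from_obligation_py_spec : Claim_equal_infer_regulator_from_obligation_py := by
  intro ot tags _
  unfold Spec_infer_regulator_from_obligation_py
  simp only [infer_regulator_from_obligation_py, infer_regulator_from_obligation_py_alt]
  have hpairK : pvKeywords.Pairwise (fun a b => a.2.1 ≤ b.2.1) := by decide
  have hpair : ((pvKeywords.filter (fun kw => PySem.Str.isIn kw.1 (PySem.Str.lower ot))).map
      (fun kw => (kw.2.1, kw.2.2))).Pairwise (fun a b : Nat × String => a.1 ≤ b.1) :=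
    List.Pairwise.map _ (fun a b h => h) (hpairK.filter _)
  rw [pvMinHead _ _ hpair, ← pvChainFind (PySem.Str.lower ot), pvChainSplit]
  cases pvChainOpt (PySem.Str.isIn "gst" (PySem.Str.lower ot)) (PySem.Str.isIn "gstr" (PySem.Str.lower ot))
      (PySem.Str.isIn "tds" (PySem.Str.lower ot)) (PySem.Str.isIn "income" (PySem.Str.lower ot))
      (PySem.Str.isIn "itr" (PySem.Str.lower ot)) (PySem.Str.isIn "advance tax" (PySem.Str.lower ot))
      (PySem.Str.isIn "rbi" (PySem.Str.lower ot)) (PySem.Str.isIn "softex" (PySem.Str.lower ot))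
      (PySem.Str.isIn "export" (PySem.Str.lower ot)) (PySem.Str.isIn "fema" (PySem.Str.lower ot))
      (PySem.Str.isIn "sebi" (PySem.Str.lower ot)) (PySem.Str.isIn "mca" (PySem.Str.lower ot))
      (PySem.Str.isIn "llp" (PySem.Str.lower ot)) (PySem.Str.isIn "cin" (PySem.Str.lower ot))
      (PySem.Str.isIn "transfer pricing" (PySem.Str.lower ot)) (PySem.Str.isIn "tp" (PySem.Str.lower ot)) with
  | some m => rfl
  | none =>
    rw [pvTagForA_eq]
    cases tags with
    | nil => rfl
    | cons t ts =>
      simp only [ne_eq, reduceCtorEq, not_false_iff, if_true]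
      cases hfm : (t :: ts).filterMap (fun t => PySem.Dict.get? pvTagMapB t) <;>
        simp [List.head?]
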